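-- pv_equiv track=rewrite | github.com/29jm/drak-lang | drak/compiler/liveness.py | interference_graph
-- ===== SOURCE A (Python) =====
-- from typing import List
--
-- class Node:
--     def __init__(self, var, links: set=set()):
--         self.var = var
--         self.links = links
--
--     def __repr__(self) -> str:
--         return f'{self.var} -> {self.links}'
--
-- def interference_graph(liveness: list) -> List[Node]:
--     nodes = {}
--
--     vars = set()
--     for life in liveness:
--         vars |= life
--     for var in vars:
--         nodes[var] = set()
--
--     for alive_together in liveness:
--         for var in alive_together:
--             nodes[var] |= alive_together - set([var])
--
--     return nodes
-- ===== SOURCE B (Python) =====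
-- def interference_graph(liveness: list):
--     variables = []
--     for life in liveness:
--         for x in life:
--             if x not in variables:
--                 variables.append(x)
--     return {v: {x for life in liveness if v in life for x in life} - {v}
--             for v in variables}
-- ===== Notes on version B (the rewrite author's own statement) =====
-- stated objective: alternative
-- what changed: A makes one pass over the liveness list and fans each live-set's clique out to its members via in-place dict updates (nodes[var] |= live - {var}); B instead first builds the ordered variable list with a membership-append loop and then builds the whole result in one dict comprehension whose value for each variable re-scans the entire liveness list, flattening every live-set containing that variable into one set and subtracting the variable.
import Mathlib
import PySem

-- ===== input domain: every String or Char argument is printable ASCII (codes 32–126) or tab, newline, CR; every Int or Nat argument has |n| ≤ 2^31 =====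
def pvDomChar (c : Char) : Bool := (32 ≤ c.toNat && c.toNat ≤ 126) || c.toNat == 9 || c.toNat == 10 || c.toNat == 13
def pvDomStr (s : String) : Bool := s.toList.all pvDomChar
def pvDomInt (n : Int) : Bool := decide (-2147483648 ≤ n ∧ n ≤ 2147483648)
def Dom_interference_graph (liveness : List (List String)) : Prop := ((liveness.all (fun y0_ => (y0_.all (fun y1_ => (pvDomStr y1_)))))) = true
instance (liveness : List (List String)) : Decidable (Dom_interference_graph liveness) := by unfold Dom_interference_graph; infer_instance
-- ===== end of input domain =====

-- B replaces A's per-live-set fan-out with in-place dict updates by a staged program: an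
-- ordered variable list built by a membership-append loop, then one dict comprehension
-- whose value per variable filters and flattens the whole liveness list (objective:
-- alternative decomposition, same asymptotic cost). Equivalence is about the returned
-- dict; neither program mutates its argument. Python set/dict iteration order is not
-- observable in the compared result (dicts and set values are compared as sets); the
-- Lean ports both realise it as first-insertion order.

-- ===== PORT A =====
-- Python A receives each element of `liveness` as a set; the ports model each as
-- PySem.Set.ofList of the given list.  `nodes[var] |= X` is Dict.modify (the key is
-- always present, so modify's default is never consulted where Python would KeyError).
def interference_graph (liveness : List (List String)) : List (String × List String) :=
  -- vars = set(); for life in liveness: vars |= life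
  let vars : PySem.Set String :=
    liveness.foldl (fun vs life => PySem.Set.union vs (PySem.Set.ofList life)) PySem.Set.empty
  -- nodes = {}; for var in vars: nodes[var] = set()
  let nodes : PySem.Dict String (List String) :=
    vars.foldl (fun d v => d.insert v PySem.Set.empty) PySem.Dict.empty
  -- for alive_together in liveness: for var in alive_together: nodes[var] |= alive_together - set([var])
  let nodes :=
    liveness.foldl (fun d alive =>
      (PySem.Set.ofList alive).foldl (fun d v =>
        d.modify v PySem.Set.empty (fun s =>
          PySem.Set.union s (PySem.Set.diff (PySem.Set.ofList alive) (PySem.Set.ofList [v])))) d) nodes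
  nodes.items

-- ===== PORT B =====
-- variables = []; for life in liveness: for x in life: if x not in variables: variables.append(x)
-- return {v: {x for life in liveness if v in life for x in life} - {v} for v in variables}
def interference_graph_alt (liveness : List (List String)) : List (String × List String) :=
  let varlist : List String :=
    liveness.foldl (fun acc life =>
      (PySem.Set.ofList life).foldl (fun acc x =>
        if acc.contains x then acc else acc ++ [x]) acc) []
  (PySem.Dict.ofList (varlist.map (fun v =>
    (v, PySem.Set.diff
          (PySem.Set.ofList ((liveness.filter (fun life => life.contains v)).flatMap
            (fun life => PySem.Set.ofList life)))
          (PySem.Set.ofList [v]))))).items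

-- ===== PRECONDITION & SPEC =====
def Spec_interference_graph (liveness : List (List String)) (out : List (String × List String)) : Prop := out = interference_graph_alt liveness
instance (liveness : List (List String)) (out : List (String × List String)) : Decidable (Spec_interference_graph liveness out) := by unfold Spec_interference_graph; infer_instance

-- ===== CLAIM (what is proved, stated in full; the proofs are below) =====
def Claim_equal_interference_graph : Prop := ∀ (liveness : List (List String)), Dom_interference_graph liveness → Spec_interference_graph liveness (interference_graph liveness)

-- ===== LEMMAS AND PROOFS =====

-- The variable set A computes, and its basic properties.
def pvVarsOf (liveness : List (List String)) : PySem.Set String :=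
  liveness.foldl (fun vs life => PySem.Set.union vs (PySem.Set.ofList life)) PySem.Set.empty

lemma pvVarsOf_nodup_aux (liveness : List (List String)) :
    ∀ acc : PySem.Set String, acc.Nodup →
      (liveness.foldl (fun vs life => PySem.Set.union vs (PySem.Set.ofList life)) acc).Nodup := by
  induction liveness with
  | nil => intro acc h; simpa using h
  | cons life rest ih =>
      intro acc h
      exact ih _ (PySem.Set.nodup_union _ _ h)

lemma pvVarsOf_nodup (liveness : List (List String)) : (pvVarsOf liveness).Nodup :=
  pvVarsOf_nodup_aux liveness PySem.Set.empty List.nodup_nil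

lemma pvMem_varsFold (liveness : List (List String)) (x : String) :
    ∀ acc : PySem.Set String,
      (x ∈ liveness.foldl (fun vs life => PySem.Set.union vs (PySem.Set.ofList life)) acc ↔
        x ∈ acc ∨ ∃ l ∈ liveness, x ∈ l) := by
  induction liveness with
  | nil => intro acc; simp
  | cons life rest ih =>
      intro acc
      rw [List.foldl_cons, ih]
      simp [PySem.Set.mem_union, PySem.Set.mem_ofList, or_assoc]

lemma pvMem_varsOf (liveness : List (List String)) (l : List String) (x : String)
    (hl : l ∈ liveness) (hx : x ∈ l) : x ∈ pvVarsOf liveness := by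
  rw [pvVarsOf, pvMem_varsFold]
  exact Or.inr ⟨l, hl, hx⟩

-- discard interacts with add / union the way removing the variable at the end does.
lemma pvDiscard_add (s : PySem.Set String) (x v : String) :
    PySem.Set.discard (PySem.Set.add s x) v =
      if x = v then PySem.Set.discard s v else PySem.Set.add (PySem.Set.discard s v) x := by
  rw [PySem.Set.add_eq_ite]
  by_cases hxv : x = v
  · subst hxv
    by_cases hx : x ∈ s
    · simp [hx]
    · simp [hx, PySem.Set.discard, List.filter_append]
  · by_cases hx : x ∈ s
    · have hx' : x ∈ PySem.Set.discard s v := (PySem.Set.mem_discard _ _ _).2 ⟨hx, hxv⟩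
      simp [hx, hxv, hx']
    · have hx' : x ∉ PySem.Set.discard s v := fun h => hx ((PySem.Set.mem_discard _ _ _).1 h).1
      simp [hx, hxv, PySem.Set.discard, List.filter_append]

lemma pvDiscard_union (t : List String) :
    ∀ s : PySem.Set String, ∀ v : String,
      PySem.Set.discard (PySem.Set.union s t) v =
        PySem.Set.union (PySem.Set.discard s v) (PySem.Set.discard t v) := by
  induction t with
  | nil => intro s v; rfl
  | cons x t ih =>
      intro s v
      have h1 : PySem.Set.union s (x :: t) = PySem.Set.union (PySem.Set.add s x) t := rfl
      have h2 : PySem.Set.discard (x :: t) v =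
          if x = v then PySem.Set.discard t v else x :: PySem.Set.discard t v := by
        by_cases hxv : x = v <;> simp [PySem.Set.discard, hxv]
      by_cases hxv : x = v
      · rw [h1, ih, pvDiscard_add, if_pos hxv, h2, if_pos hxv]
      · rw [h1, ih, pvDiscard_add, if_neg hxv, h2, if_neg hxv]
        rfl

-- alive - set([v]) is exactly "remove v" (the two boolean tests are symmetric).
lemma pvDiff_singleton (t : List String) (v : String) :
    PySem.Set.diff t (PySem.Set.ofList [v]) = PySem.Set.discard t v := by
  have h : PySem.Set.ofList [v] = [v] := rfl
  rw [h, PySem.Set.diff, PySem.Set.discard]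
  apply List.filter_congr
  intro x _
  by_cases hxv : x = v <;> simp [hxv]

-- Discarding v after unioning the live-sets containing v equals A's per-variable
-- update sequence (union of alive - {v} over the same live-sets).
lemma pvDiscard_foldl (liveness : List (List String)) (v : String) :
    ∀ acc : PySem.Set String,
      PySem.Set.discard
        (liveness.foldl (fun acc life =>
          if life.contains v then PySem.Set.union acc (PySem.Set.ofList life) else acc) acc) v =
      liveness.foldl (fun s alive =>
          if v ∈ PySem.Set.ofList alive then
            PySem.Set.union s (PySem.Set.diff (PySem.Set.ofList alive) (PySem.Set.ofList [v]))
          else s) (PySem.Set.discard acc v) := by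
  induction liveness with
  | nil => intro acc; rfl
  | cons alive rest ih =>
      intro acc
      by_cases hv : v ∈ alive
      · have hc : alive.contains v = true := by simpa using hv
        have hm : v ∈ PySem.Set.ofList alive := (PySem.Set.mem_ofList _ _).2 hv
        rw [List.foldl_cons, List.foldl_cons, if_pos hc, if_pos hm, ih,
            pvDiscard_union, pvDiff_singleton]
      · have hc : ¬ alive.contains v = true := by simpa using hv
        have hm : v ∉ PySem.Set.ofList alive := fun h => hv ((PySem.Set.mem_ofList _ _).1 h)
        rw [List.foldl_cons, List.foldl_cons, if_neg hc, if_neg hm, ih]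

-- getD through a Nodup modify-loop: the key v is updated once if present, else untouched.
lemma pvGetD_modify_fold (g : String → List String → List String) (l : List String)
    (hl : l.Nodup) (d : PySem.Dict String (List String)) (v : String) :
    (l.foldl (fun d x => d.modify x PySem.Set.empty (fun s => g x s)) d).getD v PySem.Set.empty =
      if v ∈ l then g v (d.getD v PySem.Set.empty) else d.getD v PySem.Set.empty := by
  induction l generalizing d with
  | nil => simp
  | cons x l ih =>
      have hx : x ∉ l := (List.nodup_cons.1 hl).1
      rw [List.foldl_cons, ih (List.nodup_cons.1 hl).2]
      by_cases hvl : v ∈ l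
      · have hvx : v ≠ x := fun h => hx (h ▸ hvl)
        rw [if_pos hvl, if_pos (List.mem_cons.2 (Or.inr hvl)),
            PySem.Dict.getD_modify, if_neg hvx]
      · rw [if_neg hvl, PySem.Dict.getD_modify]
        by_cases hvx : v = x
        · rw [if_pos hvx, if_pos (List.mem_cons.2 (Or.inl hvx)), hvx]
        · rw [if_neg hvx, if_neg (by simp [hvx, hvl])]

-- getD through A's outer loop: per-key it is exactly A's per-variable update fold.
lemma pvGetD_outerA (liveness : List (List String)) (v : String) :
    ∀ d : PySem.Dict String (List String),
      (liveness.foldl (fun d alive =>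
        (PySem.Set.ofList alive).foldl (fun d v =>
          d.modify v PySem.Set.empty (fun s =>
            PySem.Set.union s (PySem.Set.diff (PySem.Set.ofList alive) (PySem.Set.ofList [v])))) d)
        d).getD v PySem.Set.empty =
      liveness.foldl (fun s alive =>
          if v ∈ PySem.Set.ofList alive then
            PySem.Set.union s (PySem.Set.diff (PySem.Set.ofList alive) (PySem.Set.ofList [v]))
          else s) (d.getD v PySem.Set.empty) := by
  induction liveness with
  | nil => intro d; rfl
  | cons alive rest ih =>
      intro d
      rw [List.foldl_cons, List.foldl_cons, ih,
          pvGetD_modify_fold _ _ (PySem.Set.nodup_ofList alive)]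

-- the all-[] initial dict reads [] at every key
lemma pvGetD_init (l : List String) (v : String) :
    (l.foldl (fun d x => d.insert x (PySem.Set.empty : List String)) PySem.Dict.empty).getD
      v PySem.Set.empty = PySem.Set.empty := by
  have h : ∀ d : PySem.Dict String (List String), d.getD v PySem.Set.empty = PySem.Set.empty →
      (l.foldl (fun d x => d.insert x (PySem.Set.empty : List String)) d).getD v PySem.Set.empty
        = PySem.Set.empty := by
    induction l with
    | nil => intro d h; simpa using h
    | cons x l ih =>
        intro d h
        refine ih _ ?_
        rw [PySem.Dict.getD_insert]
        split
        · rfl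
        · exact h
  exact h _ (PySem.Dict.getD_empty _ _)

-- update by a list of already-present elements is a no-op
lemma pvUpdate_of_subset (s : PySem.Set String) (xs : List String)
    (h : ∀ x ∈ xs, x ∈ s) : PySem.Set.update s xs = s := by
  rw [PySem.Set.update_eq_append_filter]
  have : List.filter (fun y => !s.contains y) (PySem.Set.ofList xs) = [] := by
    apply List.filter_eq_nil_iff.2
    intro y hy
    have hmem : y ∈ s := h y ((PySem.Set.mem_ofList _ _).1 hy)
    simpa using hmem
  rw [this, List.append_nil]

-- keys are unchanged by A's update loops (every touched variable is already a key)
lemma pvKeys_outerA (liveness : List (List String)) :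
    ∀ d : PySem.Dict String (List String),
      (∀ life ∈ liveness, ∀ x ∈ life, x ∈ d.keys) →
      (liveness.foldl (fun d alive =>
        (PySem.Set.ofList alive).foldl (fun d v =>
          d.modify v PySem.Set.empty (fun s =>
            PySem.Set.union s (PySem.Set.diff (PySem.Set.ofList alive) (PySem.Set.ofList [v])))) d)
        d).keys = d.keys := by
  induction liveness with
  | nil => intro d _; rfl
  | cons alive rest ih =>
      intro d h
      rw [List.foldl_cons]
      have hkeys :
          ((PySem.Set.ofList alive).foldl (fun d v =>
            d.modify v PySem.Set.empty (fun s =>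
              PySem.Set.union s (PySem.Set.diff (PySem.Set.ofList alive) (PySem.Set.ofList [v])))) d).keys
          = d.keys := by
        rw [PySem.Dict.keys_foldl_modify]
        exact pvUpdate_of_subset _ _ (fun x hx =>
          h alive (List.mem_cons_self) x ((PySem.Set.mem_ofList _ _).1 hx))
      rw [ih _ (by rw [hkeys]; exact fun life hl => h life (List.mem_cons_of_mem _ hl)), hkeys]

-- keys of the initial all-[] dict are exactly the (Nodup) variable list
lemma pvKeys_init (l : List String) (hl : l.Nodup) :
    (l.foldl (fun d x => d.insert x (PySem.Set.empty : List String)) PySem.Dict.empty).keys = l := by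
  rw [PySem.Dict.keys_foldl_insert (f := fun _ _ => PySem.Set.empty), PySem.Dict.keys_empty]
  exact PySem.Set.ofList_eq_self_of_nodup l hl

lemma pvNodup_keys_of_keys_eq (d : PySem.Dict String (List String)) (l : List String)
    (h : d.keys = l) (hl : l.Nodup) : d.keys.Nodup := h ▸ hl

-- ===== B-side lemmas =====

-- B's membership-append loop is the same state machine as A's vars |= life fold.
lemma pvInner_append_eq_update (life : List String) :
    ∀ acc : PySem.Set String,
      (PySem.Set.ofList life).foldl (fun acc x =>
        if acc.contains x then acc else acc ++ [x]) acc
        = PySem.Set.update acc (PySem.Set.ofList life) := by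
  have hstep : (fun (acc : PySem.Set String) (x : String) =>
      if acc.contains x then acc else acc ++ [x]) = PySem.Set.add := by
    funext acc x
    rw [PySem.Set.add_eq_ite]
    by_cases hx : x ∈ acc <;> simp [hx]
  intro acc
  rw [hstep, PySem.Set.update]

lemma pvVariables_eq_vars (liveness : List (List String)) :
    liveness.foldl (fun acc life =>
      (PySem.Set.ofList life).foldl (fun acc x =>
        if acc.contains x then acc else acc ++ [x]) acc) []
    = pvVarsOf liveness := by
  have hstep : (fun (acc : PySem.Set String) (life : List String) =>
      (PySem.Set.ofList life).foldl (fun acc x =>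
        if acc.contains x then acc else acc ++ [x]) acc)
      = (fun vs life => PySem.Set.union vs (PySem.Set.ofList life)) := by
    funext acc life
    exact pvInner_append_eq_update life acc
  rw [pvVarsOf]
  exact congrArg (fun f => List.foldl f PySem.Set.empty liveness) hstep

-- a guarded fold over the whole list is a plain fold over the filtered list
lemma pvFoldl_filter (p : List String → Bool)
    (g : PySem.Set String → List String → PySem.Set String) (l : List (List String)) :
    ∀ acc : PySem.Set String,
      l.foldl (fun acc life => if p life then g acc life else acc) acc
        = (l.filter p).foldl g acc := by
  induction l with
  | nil => intro acc; rfl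
  | cons life rest ih =>
      intro acc
      by_cases hp : p life = true
      · rw [List.foldl_cons, if_pos hp, List.filter_cons_of_pos hp, List.foldl_cons, ih]
      · rw [List.foldl_cons, if_neg hp, List.filter_cons_of_neg (by simpa using hp), ih]

-- flattening live-sets into one set comprehension is the union fold
lemma pvOfList_flatMap (l : List (List String)) :
    ∀ acc : PySem.Set String,
      PySem.Set.update acc (l.flatMap (fun life => PySem.Set.ofList life))
        = l.foldl (fun acc life => PySem.Set.union acc (PySem.Set.ofList life)) acc := by
  induction l with
  | nil => intro acc; rfl
  | cons life rest ih =>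
      intro acc
      rw [List.flatMap_cons, PySem.Set.update_append, ih]
      rfl

-- B's value for a variable v equals A's per-variable update fold started from ∅.
lemma pvValueB_eq (liveness : List (List String)) (v : String) :
    PySem.Set.diff
        (PySem.Set.ofList ((liveness.filter (fun life => life.contains v)).flatMap
          (fun life => PySem.Set.ofList life)))
        (PySem.Set.ofList [v])
      = liveness.foldl (fun s alive =>
          if v ∈ PySem.Set.ofList alive then
            PySem.Set.union s (PySem.Set.diff (PySem.Set.ofList alive) (PySem.Set.ofList [v]))
          else s) PySem.Set.empty := by
  rw [pvDiff_singleton]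
  have h1 : PySem.Set.ofList ((liveness.filter (fun life => life.contains v)).flatMap
      (fun life => PySem.Set.ofList life))
      = (liveness.filter (fun life => life.contains v)).foldl
          (fun acc life => PySem.Set.union acc (PySem.Set.ofList life)) PySem.Set.empty := by
    rw [← pvOfList_flatMap]
    rfl
  rw [h1, ← pvFoldl_filter, pvDiscard_foldl]
  rfl

-- items of the dict comprehension over the Nodup key list
lemma pvItems_ofList_map (l : List String) (hl : l.Nodup)
    (f : String → List String) :
    (PySem.Dict.ofList (l.map (fun v => (v, f v)))).items = l.map (fun v => (v, f v)) := by
  have hfold : PySem.Dict.ofList (l.map (fun v => (v, f v)))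
      = (l.map (fun v => (v, f v))).foldl
          (fun d p => d.insert p.1 p.2) PySem.Dict.empty := rfl
  have h := PySem.Dict.items_foldl_insert_fresh (l := l.map (fun v => (v, f v)))
      (k := Prod.fst) (v := Prod.snd)
      (d := (PySem.Dict.empty : PySem.Dict String (List String)))
      (by intro a _; exact PySem.Dict.contains_empty _)
      (by simpa [List.map_map, Function.comp_def] using hl)
  rw [hfold]
  simpa using h

-- ===== VERDICT (by name: the statement is the Claim_ definition above) =====
theorem interference_graph_spec : Claim_equal_interference_graph := by
  intro liveness _
  unfold Spec_interference_graph interference_graph interference_graph_alt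
  set V := liveness.foldl (fun vs life => PySem.Set.union vs (PySem.Set.ofList life)) PySem.Set.empty with hVdef
  have hVN : V.Nodup := pvVarsOf_nodup liveness
  have hVmem : ∀ life ∈ liveness, ∀ x ∈ life, x ∈ V := fun life hl x hx =>
    pvMem_varsOf liveness life x hl hx
  -- A's final items
  have hKinit := pvKeys_init V hVN
  have hKA := pvKeys_outerA liveness _ (by rw [hKinit]; exact hVmem)
  rw [hKinit] at hKA
  have hItemsA := PySem.Dict.items_eq_map_keys _ (pvNodup_keys_of_keys_eq _ _ hKA hVN)
    PySem.Set.empty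
  rw [hKA] at hItemsA
  -- B's variables list is V, and its items are the mapped comprehension
  have hvars : liveness.foldl (fun acc life =>
      (PySem.Set.ofList life).foldl (fun acc x =>
        if acc.contains x then acc else acc ++ [x]) acc) [] = V :=
    pvVariables_eq_vars liveness
  rw [hItemsA, hvars, pvItems_ofList_map V hVN]
  apply List.map_congr_left
  intro v hv
  rw [pvGetD_outerA, pvGetD_init, pvValueB_eq]
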